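-- pv_equiv track=rewrite | github.com/DereckLuo/CS446-Machine-Learning-Project | atisRNNtest.py | extractSentence
-- ===== SOURCE A (Python) =====
-- def extractSentence(line):
--     word = "".join((char if char.isalpha() else " ") for char in line).split()
--     label = word[len(word)-1]
--     sentence = []
--     for w in word:
--         if w == "BOS":
--             continue
--         elif w =="EOS":
--             break
--         else:
--             sentence.append(w)
--     return sentence, label
-- ===== SOURCE B (Python) =====
-- def extractSentence(line):
--     # Single character-level state machine: scan the line once, building each
--     # alphabetic run directly and classifying it as it completes (no intermediate
--     # translated string, no split, no token list). Trailing "\n" sentinel flushes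
--     # the last pending word. On a line with no alphabetic character (where A
--     # raises IndexError) this returns ([], None).
--     sentence = []
--     label = None
--     cur = ""
--     done = False
--     for c in line + "\n":
--         if c.isalpha():
--             cur += c
--         elif cur:
--             label = cur
--             if cur == "EOS":
--                 done = True
--             elif cur != "BOS" and not done:
--                 sentence.append(cur)
--             cur = ""
--     return sentence, label
-- ===== Notes on version B (the rewrite author's own statement) =====
-- stated objective: alternative
-- what changed: A builds a space-translated copy of the string, splits it into a word list, indexes the last word, and then runs a second break/continue loop over the words; B is a single character-level state machine that scans the line once, assembling each alphabetic run in place and classifying it (label update, EOS flag, BOS skip) the moment it completes - no intermediate string, no split, no token-list pass.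
import Mathlib
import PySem

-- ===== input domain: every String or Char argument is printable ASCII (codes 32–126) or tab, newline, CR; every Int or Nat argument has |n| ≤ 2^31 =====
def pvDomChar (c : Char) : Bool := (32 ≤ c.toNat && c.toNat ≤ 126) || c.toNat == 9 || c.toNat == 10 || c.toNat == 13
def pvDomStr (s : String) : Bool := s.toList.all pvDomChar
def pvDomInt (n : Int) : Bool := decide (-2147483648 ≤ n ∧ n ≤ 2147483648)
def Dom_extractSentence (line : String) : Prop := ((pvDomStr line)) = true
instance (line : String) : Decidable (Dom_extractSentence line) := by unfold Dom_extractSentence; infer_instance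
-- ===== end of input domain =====

-- B replaces A's build-translated-string + split + token loop by a single character-level
-- state machine over the line (alternative decomposition, same asymptotic cost).

-- ===== PORT A =====
-- A's for-loop over the words with continue/break, carrying the 'sentence' accumulator.
def extractSentenceLoop (sentence : List String) (ws : List String) : List String :=
  match ws with
  | [] => sentence
  | w :: rest =>
    if w = "BOS" then extractSentenceLoop sentence rest
    else if w = "EOS" then sentence
    else extractSentenceLoop (sentence ++ [w]) rest

def extractSentence (line : String) : List String × String :=
  let word := PySem.Str.split₀
    (PySem.Str.join "" (line.toList.map (fun c => if PySem.Chars.isalpha c then String.ofList [c] else " ")))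
  -- word[len(word)-1]: IndexError (= none) when word = []; excluded by Pre_
  let label := (PySem.List.pyGet? word ((word.length : Int) - 1)).getD ""
  (extractSentenceLoop [] word, label)

-- ===== PORT B =====
-- the loop body of Source B: state (sentence, label, cur, done); Python's 'label = None'
-- initial value is rendered as "" (under Pre_ the label is always overwritten).
def extractSentenceStep (st : List String × String × List Char × Bool) (c : Char) :
    List String × String × List Char × Bool :=
  let (sentence, label, cur, done) := st
  if PySem.Chars.isalpha c then (sentence, label, cur ++ [c], done)
  else if cur ≠ [] then
    let w := String.ofList cur
    if w = "EOS" then (sentence, w, [], true)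
    else if w ≠ "BOS" ∧ done = false then (sentence ++ [w], w, [], done)
    else (sentence, w, [], done)
  else st

def extractSentence_alt (line : String) : List String × String :=
  let st := (line.toList ++ ['\n']).foldl extractSentenceStep ([], "", [], false)
  (st.1, st.2.1)

-- ===== PRECONDITION & SPEC =====
-- Pre_ excludes lines with no alphabetic character: the token list is empty there and A raises IndexError.
def Pre_extractSentence (line : String) : Prop :=
  line.toList.any PySem.Chars.isalpha = true
instance (line : String) : Decidable (Pre_extractSentence line) := by
  unfold Pre_extractSentence; infer_instance
def pvWitness_extractSentence : String := "BOS hi there EOS x"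
def Spec_extractSentence (line : String) (out : List String × String) : Prop := out = extractSentence_alt line
instance (line : String) (out : List String × String) : Decidable (Spec_extractSentence line out) := by unfold Spec_extractSentence; infer_instance

-- ===== CLAIM (what is proved, stated in full; the proofs are below) =====
def Claim_equal_extractSentence : Prop := ∀ (line : String), Dom_extractSentence line → Pre_extractSentence line → Spec_extractSentence line (extractSentence line)

-- ===== LEMMAS AND PROOFS =====

-- alphabetic and whitespace characters are disjoint
theorem alpha_not_space (c : Char) (h : PySem.Chars.isalpha c = true) :
    PySem.Chars.isspace c = false := by
  have hA : 'A'.val.toNat = 65 := rfl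
  have hZ : 'Z'.val.toNat = 90 := rfl
  have ha : 'a'.val.toNat = 97 := rfl
  have hz : 'z'.val.toNat = 122 := rfl
  simp only [PySem.Chars.isalpha, PySem.Chars.isupper, PySem.Chars.islower,
    Char.le_def, UInt32.le_iff_toNat_le, hA, hZ, ha, hz, Bool.or_eq_true,
    Bool.and_eq_true, decide_eq_true_eq] at h
  simp only [PySem.Chars.isspace, Char.toNat, Bool.or_eq_false_iff, Bool.and_eq_false_iff,
    decide_eq_false_iff_not]
  omega

-- the maximal alphabetic runs of a char list, given a pending run 'cur'
def alphaRuns : List Char → List Char → List (List Char)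
  | [], cur => if cur = [] then [] else [cur]
  | c :: rest, cur =>
    if PySem.Chars.isalpha c then alphaRuns rest (cur ++ [c])
    else if cur = [] then alphaRuns rest []
    else cur :: alphaRuns rest []

-- the "replace non-alpha by space" map of A
def spaceMap (c : Char) : Char := if PySem.Chars.isalpha c then c else ' '

-- split₀ of the space-mapped string computes the alphabetic runs
theorem split₀_go_spaceMap (cs : List Char) : ∀ (cur : List Char) (acc : List (List Char)),
    PySem.Chars.split₀.go (cs.map spaceMap) cur acc = acc.reverse ++ alphaRuns cs cur.reverse := by
  induction cs with
  | nil =>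
    intro cur acc
    by_cases hc : cur = []
    · simp [PySem.Chars.split₀.go, alphaRuns, hc]
    · simp [PySem.Chars.split₀.go, alphaRuns, hc, List.isEmpty_iff]
  | cons c rest ih =>
    intro cur acc
    by_cases ha : PySem.Chars.isalpha c = true
    · have hs : PySem.Chars.isspace c = false := alpha_not_space c ha
      simp [PySem.Chars.split₀.go, spaceMap, ha, hs, alphaRuns, ih]
    · have hm : spaceMap c = ' ' := by simp [spaceMap, ha]
      have hs : PySem.Chars.isspace ' ' = true := by decide
      by_cases hc : cur = []
      · simp [PySem.Chars.split₀.go, hm, hs, alphaRuns, ha, hc, ih]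
      · simp [PySem.Chars.split₀.go, hm, hs, alphaRuns, ha, hc, List.isEmpty_iff, ih]
  termination_by cs.length

theorem split₀_spaceMap (cs : List Char) :
    PySem.Chars.split₀ (cs.map spaceMap) = alphaRuns cs [] := by
  simpa using split₀_go_spaceMap cs [] []

-- the word list A builds is the list of alphabetic runs
theorem wordList_eq (cs : List Char) :
    PySem.Str.split₀
      (PySem.Str.join "" (cs.map (fun c => if PySem.Chars.isalpha c then String.ofList [c] else " "))) =
    (alphaRuns cs []).map String.ofList := by
  have h : (PySem.Str.join ""
      (cs.map (fun c => if PySem.Chars.isalpha c then String.ofList [c] else " "))).toList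
      = cs.map spaceMap := by
    simp only [PySem.Str.join, String.toList_ofList, PySem.Chars.join, List.map_map]
    have : (String.toList ∘ fun c => if PySem.Chars.isalpha c then String.ofList [c] else " ")
        = fun c => [spaceMap c] := by
      funext c
      by_cases ha : PySem.Chars.isalpha c = true <;> simp [spaceMap, ha]
    rw [this]
    have h2 : (fun c => [spaceMap c]) = (fun x => [x]) ∘ spaceMap := rfl
    rw [h2, ← List.map_map]
    exact PySem.Chars.join_nil_singletons _
  simp only [PySem.Str.split₀, h, split₀_spaceMap]

-- abstract post-processing of a run list, mirroring B's flush branches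
def postRuns (sentence : List String) (label : String) (done : Bool) :
    List (List Char) → List String × String
  | [] => (sentence, label)
  | r :: rs =>
    let w := String.ofList r
    if w = "EOS" then postRuns sentence w true rs
    else if w ≠ "BOS" ∧ done = false then postRuns (sentence ++ [w]) w done rs
    else postRuns sentence w done rs

-- B's char fold computes postRuns of the alphabetic runs
theorem fold_eq_postRuns (cs : List Char) :
    ∀ (sentence : List String) (label : String) (cur : List Char) (done : Bool),
    (((cs ++ ['\n']).foldl extractSentenceStep (sentence, label, cur, done)).1,
     ((cs ++ ['\n']).foldl extractSentenceStep (sentence, label, cur, done)).2.1) =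
      postRuns sentence label done (alphaRuns cs cur) := by
  induction cs with
  | nil =>
    intro sentence label cur done
    have hn : PySem.Chars.isalpha '\n' = false := by decide
    by_cases hc : cur = []
    · simp [extractSentenceStep, alphaRuns, postRuns, hn, hc]
    · by_cases he : String.ofList cur = "EOS"
      · simp [extractSentenceStep, alphaRuns, postRuns, hn, hc, he]
      · by_cases hb : String.ofList cur ≠ "BOS" ∧ done = false
        · simp [extractSentenceStep, alphaRuns, postRuns, hn, hc, he, hb]
        · simp [extractSentenceStep, alphaRuns, postRuns, hn, hc, he, hb]
  | cons c rest ih =>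
    intro sentence label cur done
    simp only [List.cons_append, List.foldl_cons]
    by_cases ha : PySem.Chars.isalpha c = true
    · rw [show extractSentenceStep (sentence, label, cur, done) c
          = (sentence, label, cur ++ [c], done) from by simp [extractSentenceStep, ha]]
      rw [show alphaRuns (c :: rest) cur = alphaRuns rest (cur ++ [c]) from by
        simp [alphaRuns, ha]]
      exact ih sentence label (cur ++ [c]) done
    · by_cases hc : cur = []
      · subst hc
        rw [show extractSentenceStep (sentence, label, [], done) c
            = (sentence, label, [], done) from by simp [extractSentenceStep, ha]]
        rw [show alphaRuns (c :: rest) [] = alphaRuns rest [] from by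
          simp [alphaRuns, ha]]
        exact ih sentence label [] done
      · rw [show alphaRuns (c :: rest) cur = cur :: alphaRuns rest [] from by
          simp [alphaRuns, ha, hc]]
        by_cases he : String.ofList cur = "EOS"
        · rw [show extractSentenceStep (sentence, label, cur, done) c
              = (sentence, String.ofList cur, [], true) from by
            simp [extractSentenceStep, ha, hc, he]]
          rw [show postRuns sentence label done (cur :: alphaRuns rest [])
              = postRuns sentence (String.ofList cur) true (alphaRuns rest []) from by
            simp [postRuns, he]]
          rw [he]
          exact ih sentence "EOS" [] true
        · by_cases hb : String.ofList cur ≠ "BOS" ∧ done = false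
          · rw [show extractSentenceStep (sentence, label, cur, done) c
                = (sentence ++ [String.ofList cur], String.ofList cur, [], done) from by
              simp [extractSentenceStep, ha, hc, he, hb]]
            rw [show postRuns sentence label done (cur :: alphaRuns rest [])
                = postRuns (sentence ++ [String.ofList cur]) (String.ofList cur) done
                    (alphaRuns rest []) from by simp [postRuns, he, hb]]
            exact ih (sentence ++ [String.ofList cur]) (String.ofList cur) [] done
          · rw [show extractSentenceStep (sentence, label, cur, done) c
                = (sentence, String.ofList cur, [], done) from by
              simp [extractSentenceStep, ha, hc, he, hb]]
            rw [show postRuns sentence label done (cur :: alphaRuns rest [])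
                = postRuns sentence (String.ofList cur) done (alphaRuns rest []) from by
              simp [postRuns, he, hb]]
            exact ih sentence (String.ofList cur) [] done

-- postRuns closed form: filtered takeWhile prefix and last word
theorem postRuns_eq (rs : List (List Char)) :
    ∀ (sentence : List String) (label : String) (done : Bool),
    postRuns sentence label done rs =
      (sentence ++ (if done then []
          else ((rs.map String.ofList).takeWhile (fun w => w ≠ "EOS")).filter (fun w => w ≠ "BOS")),
       (rs.map String.ofList).getLastD label) := by
  induction rs with
  | nil => intro sentence label done; simp [postRuns]
  | cons r rest ih =>
    intro sentence label done
    simp only [List.map_cons, List.getLastD_cons]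
    by_cases he : String.ofList r = "EOS"
    · rw [show postRuns sentence label done (r :: rest)
          = postRuns sentence (String.ofList r) true rest from by simp [postRuns, he]]
      rw [ih]
      refine Prod.ext ?_ rfl
      simp [List.takeWhile_cons, he]
    · by_cases hd : done = true
      · rw [show postRuns sentence label done (r :: rest)
            = postRuns sentence (String.ofList r) done rest from by
          simp [postRuns, he, hd]]
        rw [ih]
        simp [hd]
      · simp only [Bool.not_eq_true] at hd
        subst hd
        by_cases hb : String.ofList r = "BOS"
        · rw [show postRuns sentence label false (r :: rest)
              = postRuns sentence (String.ofList r) false rest from by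
            simp [postRuns, he, hb]]
          rw [ih]
          refine Prod.ext ?_ rfl
          simp [List.takeWhile_cons, he, hb]
        · rw [show postRuns sentence label false (r :: rest)
              = postRuns (sentence ++ [String.ofList r]) (String.ofList r) false rest from by
            simp [postRuns, he, hb]]
          rw [ih]
          refine Prod.ext ?_ rfl
          simp [List.takeWhile_cons, he, hb]

-- A's loop is: accumulator ++ (filter of the prefix before the first "EOS")
theorem extractSentenceLoop_eq (ws : List String) : ∀ (acc : List String),
    extractSentenceLoop acc ws =
      acc ++ (ws.takeWhile (fun w => w ≠ "EOS")).filter (fun w => w ≠ "BOS") := by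
  induction ws with
  | nil => intro acc; simp [extractSentenceLoop]
  | cons w rest ih =>
    intro acc
    by_cases hb : w = "BOS"
    · subst hb
      simp [extractSentenceLoop, List.takeWhile, ih]
    · by_cases he : w = "EOS"
      · subst he
        simp [extractSentenceLoop, List.takeWhile, hb]
      · simp [extractSentenceLoop, List.takeWhile, hb, he, ih]

-- A's index len-1 read of a nonempty list is its last element
theorem pyGet_last (ws : List String) (h : ws ≠ []) :
    (PySem.List.pyGet? ws ((ws.length : Int) - 1)).getD "" = ws.getLastD "" := by
  rcases ws with _ | ⟨w, rest⟩
  · exact absurd rfl h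
  · simp only [PySem.List.pyGet?, PySem.List.pyIdx?, List.length_cons]
    have h1 : (0 : Int) ≤ ((rest.length + 1 : Nat) : Int) - 1 := by push_cast; omega
    have h2 : ((rest.length + 1 : Nat) : Int) - 1 < ((rest.length + 1 : Nat) : Int) := by omega
    rw [if_pos h1, if_pos h2]
    have h3 : (((rest.length + 1 : Nat) : Int) - 1).toNat = rest.length := by push_cast; omega
    rw [h3]
    rw [List.getLastD_eq_getLast?, List.getLast?_eq_getElem?]
    simp

-- with a nonempty pending run the run list is never empty
theorem alphaRuns_cur_ne_nil (cs : List Char) : ∀ cur, cur ≠ [] → alphaRuns cs cur ≠ [] := by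
  induction cs with
  | nil => intro cur h; simp [alphaRuns, h]
  | cons c rest ih =>
    intro cur h
    by_cases ha : PySem.Chars.isalpha c = true
    · simp only [alphaRuns, ha, if_true]
      exact ih (cur ++ [c]) (by simp)
    · simp [alphaRuns, ha, h]

-- a line with an alphabetic character has a nonempty run list
theorem alphaRuns_ne_nil (cs : List Char) (h : cs.any PySem.Chars.isalpha = true) :
    ∀ cur, alphaRuns cs cur ≠ [] := by
  induction cs with
  | nil => simp at h
  | cons c rest ih =>
    intro cur
    simp only [List.any_cons, Bool.or_eq_true] at h
    by_cases ha : PySem.Chars.isalpha c = true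
    · simp only [alphaRuns, ha, if_true]
      rcases rest with _ | _
      · simp [alphaRuns]
      · -- nonempty pending run: the run list of any list with nonempty cur is nonempty
        exact alphaRuns_cur_ne_nil _ _ (by simp)
    · rcases h with h | h
      · exact absurd h ha
      · simp only [alphaRuns, ha, if_false]
        by_cases hc : cur = []
        · simp only [hc, if_true]; exact ih h []
        · simp [hc]

-- ===== VERDICT (by name: the statement is the Claim_ definition above) =====
theorem extractSentence_spec : Claim_equal_extractSentence := by
  intro line _ hp
  unfold Spec_extractSentence extractSentence extractSentence_alt
  have hne : alphaRuns line.toList [] ≠ [] :=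
    alphaRuns_ne_nil line.toList (by simpa [Pre_extractSentence, List.any_eq] using hp) []
  rw [wordList_eq]
  show (extractSentenceLoop [] ((alphaRuns line.toList []).map String.ofList),
        (PySem.List.pyGet? ((alphaRuns line.toList []).map String.ofList)
          ((((alphaRuns line.toList []).map String.ofList).length : Int) - 1)).getD "")
      = ((((line.toList ++ ['\n']).foldl extractSentenceStep ([], "", [], false)).1,
          ((line.toList ++ ['\n']).foldl extractSentenceStep ([], "", [], false)).2.1))
  rw [fold_eq_postRuns, postRuns_eq, extractSentenceLoop_eq,
      pyGet_last _ (by simpa using hne)]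
  simp
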